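-- pv_equiv track=rewrite | github.com/natesmalley/Purple-Pipeline-Parser-Eater | components/testing_harness/jarvis_event_bridge.py | _normalize_parser_name
-- ===== SOURCE A (Python) =====
-- def _normalize_parser_name(name: str) -> str:
--     """Normalize parser name for lookup."""
--     normalized = name.lower().replace("-", "_").replace(" ", "_")
--     suffixes = (
--         "_latest",
--         "_lastest",
--         "_logs",
--         "_log",
--         "_collector",
--         "_events",
--     )
--     changed = True
--     while changed:
--         changed = False
--         for suffix in suffixes:
--             if normalized.endswith(suffix):
--                 normalized = normalized[: -len(suffix)]
--                 changed = True
--     return normalized.strip("_")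
-- ===== SOURCE B (Python) =====
-- def _normalize_parser_name(name: str) -> str:
--     """Normalize parser name by keeping a prefix of the underscore tokens."""
--     normalized = name.lower().replace("-", "_").replace(" ", "_")
--     droppable = ("latest", "lastest", "logs", "log", "collector", "events")
--     toks = normalized.split("_")
--     k = len(toks)
--     while k > 1 and toks[k - 1] in droppable:
--         k -= 1
--     return "_".join(toks[:k]).strip("_")
-- ===== Notes on version B (the rewrite author's own statement) =====
-- stated objective: alternative
-- what changed: Replaced A's while-changed fixpoint that repeatedly tests and slices six underscore-prefixed suffixes off the string by splitting the normalized name on underscores once and shrinking a kept-prefix counter k over the token list while the last kept token is droppable, then rejoining the first k tokens.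
import Mathlib
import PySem

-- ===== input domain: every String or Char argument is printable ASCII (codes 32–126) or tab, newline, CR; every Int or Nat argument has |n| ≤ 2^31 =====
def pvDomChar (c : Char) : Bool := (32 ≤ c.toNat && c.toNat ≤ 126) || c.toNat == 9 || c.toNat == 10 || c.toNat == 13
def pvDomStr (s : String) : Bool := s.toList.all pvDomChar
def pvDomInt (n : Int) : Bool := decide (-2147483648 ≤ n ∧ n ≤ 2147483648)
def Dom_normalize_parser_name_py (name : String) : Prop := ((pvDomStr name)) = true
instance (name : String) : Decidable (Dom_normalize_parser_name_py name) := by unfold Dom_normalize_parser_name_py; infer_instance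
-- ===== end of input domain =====

-- B replaces A's character-level while-changed suffix-stripping fixpoint by splitting the normalized
-- name on '_' once and shrinking a kept-prefix counter over the token list, then rejoining
-- (objective: alternative algorithm; no speed claim).

-- ===== PORT A =====
-- A's first line: name.lower().replace("-", "_").replace(" ", "_")
def pvNorm (cs : List Char) : List Char :=
  PySem.Chars.replace (PySem.Chars.replace (PySem.Chars.lower cs) ['-'] ['_']) [' '] ['_']

def pvSuffixes : List (List Char) :=
  [['_','l','a','t','e','s','t'], ['_','l','a','s','t','e','s','t'], ['_','l','o','g','s'],
   ['_','l','o','g'], ['_','c','o','l','l','e','c','t','o','r'], ['_','e','v','e','n','t','s']]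

-- one step of A's inner 'for suffix in suffixes' loop, state = (normalized, changed)
def pvStepA (st : List Char × Bool) (suf : List Char) : List Char × Bool :=
  if PySem.Chars.endswith st.1 suf then
    (PySem.Chars.slice st.1 none (some (-(suf.length : Int))), true)
  else st

-- A's 'while changed' loop; the fuel only bounds the iteration count (each changed pass
-- strips at least one character, so length+1 passes always suffice)
def pvLoopA : Nat → List Char → List Char
  | 0, s => s
  | fuel+1, s =>
    let st := pvSuffixes.foldl pvStepA (s, false)
    if st.2 then pvLoopA fuel st.1 else st.1

def normalize_parser_name_py (name : String) : String :=
  String.ofList (PySem.Chars.stripChars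
    (pvLoopA ((pvNorm name.toList).length + 1) (pvNorm name.toList)) ['_'])

-- ===== PORT B =====
-- B's droppable tuple of bare token words
def pvDroppable : List (List Char) :=
  ["latest".toList, "lastest".toList, "logs".toList, "log".toList,
   "collector".toList, "events".toList]

-- B's 'while k > 1 and toks[k-1] in droppable: k -= 1' (the counter k is the Nat argument)
def pvKeep (toks : List (List Char)) : Nat → Nat
  | 0 => 0
  | j+1 => if 1 < j + 1 ∧ toks.getD j [] ∈ pvDroppable then pvKeep toks j else j + 1

def normalize_parser_name_py_alt (name : String) : String :=
  let toks := PySem.Chars.splitOn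
    (PySem.Str.replace (PySem.Str.replace (PySem.Str.lower name) "-" "_") " " "_").toList ['_']
  String.ofList (PySem.Chars.stripChars
    (PySem.Chars.join ['_'] (toks.take (pvKeep toks toks.length))) ['_'])

-- ===== PRECONDITION & SPEC =====
def Spec_normalize_parser_name_py (name : String) (out : String) : Prop := out = normalize_parser_name_py_alt name
instance (name : String) (out : String) : Decidable (Spec_normalize_parser_name_py name out) := by unfold Spec_normalize_parser_name_py; infer_instance

-- ===== CLAIM (what is proved, stated in full; the proofs are below) =====
def Claim_equal_normalize_parser_name_py : Prop := ∀ (name : String), Dom_normalize_parser_name_py name → Spec_normalize_parser_name_py name (normalize_parser_name_py name)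

-- ===== LEMMAS AND PROOFS =====

-- structural model of s.split("_")
def pvSplitU : List Char → List (List Char)
  | [] => [[]]
  | c :: rest => if c = '_' then [] :: pvSplitU rest else (pvSplitU rest).modifyHead (c :: ·)

lemma pvSplitU_ne_nil (s : List Char) : pvSplitU s ≠ [] := by
  induction s with
  | nil => simp [pvSplitU]
  | cons c rest ih =>
    simp only [pvSplitU]
    split_ifs
    · simp
    · cases h : pvSplitU rest with
      | nil => exact absurd h ih
      | cons h0 t0 => simp

lemma pvSplitOn_go_eq (l : List Char) (fuel : Nat) (cur : List Char) (acc : List (List Char))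
    (h : l.length ≤ fuel) :
    PySem.Chars.splitOn.go ['_'] fuel l cur acc
      = acc.reverse ++ (pvSplitU l).modifyHead (cur.reverse ++ ·) := by
  induction l generalizing fuel cur acc with
  | nil => cases fuel <;> simp [PySem.Chars.splitOn.go, pvSplitU]
  | cons c rest ih =>
    cases fuel with
    | zero => simp at h
    | succ f =>
      simp only [PySem.Chars.splitOn.go]
      by_cases hc : c = '_'
      · subst hc
        have hpre : List.isPrefixOf ['_'] ('_' :: rest) = true := by
          simp [List.isPrefixOf]
        rw [if_pos hpre]
        rw [show List.drop (['_'] : List Char).length ('_' :: rest) = rest from rfl]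
        rw [ih f [] (cur.reverse :: acc) (by simpa using Nat.le_of_succ_le_succ h)]
        simp [pvSplitU]
        obtain ⟨h0, t0, he⟩ := List.exists_cons_of_ne_nil (pvSplitU_ne_nil rest)
        simp [he]
      · have hpre : List.isPrefixOf ['_'] (c :: rest) = false := by
          simp [List.isPrefixOf]
          exact fun hce => absurd hce.symm hc
        rw [if_neg (by simp [hpre])]
        rw [ih f (c :: cur) acc (by simpa using Nat.le_of_succ_le_succ h)]
        simp only [pvSplitU, if_neg hc]
        obtain ⟨h0, t0, he⟩ := List.exists_cons_of_ne_nil (pvSplitU_ne_nil rest)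
        simp [he]

lemma pvSplitOn_eq (s : List Char) : PySem.Chars.splitOn s ['_'] = pvSplitU s := by
  unfold PySem.Chars.splitOn
  rw [pvSplitOn_go_eq s (s.length + 1) [] [] (by omega)]
  obtain ⟨h0, t0, he⟩ := List.exists_cons_of_ne_nil (pvSplitU_ne_nil s)
  simp [he]

lemma pvJoin_concat (T : List (List Char)) (t : List Char) (h : T ≠ []) :
    PySem.Chars.join ['_'] (T ++ [t]) = PySem.Chars.join ['_'] T ++ '_' :: t := by
  induction T with
  | nil => exact absurd rfl h
  | cons a T ih =>
    cases T with
    | nil => simp [PySem.Chars.join_cons_cons, PySem.Chars.join_singleton]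
    | cons b T' =>
      have := ih (by simp)
      simp only [List.cons_append, PySem.Chars.join_cons_cons] at *
      rw [this]
      simp

lemma pvJoin_splitU (s : List Char) : PySem.Chars.join ['_'] (pvSplitU s) = s := by
  induction s with
  | nil => simp [pvSplitU, PySem.Chars.join_singleton]
  | cons c rest ih =>
    simp only [pvSplitU]
    obtain ⟨h0, t0, he⟩ := List.exists_cons_of_ne_nil (pvSplitU_ne_nil rest)
    split_ifs with hc
    · subst hc
      rw [he, PySem.Chars.join_cons_cons]
      rw [he] at ih
      simp [ih]
    · rw [he, List.modifyHead_cons]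
      rw [he] at ih
      cases t0 with
      | nil => simp_all [PySem.Chars.join_singleton]
      | cons b t1 =>
        rw [PySem.Chars.join_cons_cons] at ih ⊢
        simp [← ih]

def pvWF (T : List (List Char)) : Prop := ∀ x ∈ T, ('_' : Char) ∉ x

lemma pvSplitU_free (s : List Char) : pvWF (pvSplitU s) := by
  induction s with
  | nil => intro x hx; simp [pvSplitU] at hx; simp [hx]
  | cons c rest ih =>
    intro x hx
    simp only [pvSplitU] at hx
    split_ifs at hx with hc
    · rcases List.mem_cons.mp hx with h | h
      · simp [h]
      · exact ih x h
    · obtain ⟨h0, t0, he⟩ := List.exists_cons_of_ne_nil (pvSplitU_ne_nil rest)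
      rw [he, List.modifyHead_cons] at hx
      rcases List.mem_cons.mp hx with h | h
      · subst h
        intro hmem
        rcases List.mem_cons.mp hmem with h' | h'
        · exact hc h'.symm
        · exact ih h0 (by simp [he]) h'
      · exact ih x (by simp [he, h])

lemma pvSplitU_len (s : List Char) : (pvSplitU s).length ≤ s.length + 1 := by
  induction s with
  | nil => simp [pvSplitU]
  | cons c rest ih =>
    simp only [pvSplitU]
    split_ifs
    · simpa using Nat.succ_le_succ ih
    · simp only [List.length_modifyHead, List.length_cons]
      omega

-- the crux: on a '_'-free token list, the string ends with '_'+tok iff the last token is tok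
lemma pvEndswith_join (T : List (List Char)) (tok : List Char) (hT : pvWF T) (htok : ('_' : Char) ∉ tok) :
    PySem.Chars.endswith (PySem.Chars.join ['_'] T) ('_' :: tok) = true
      ↔ 2 ≤ T.length ∧ T.getLast? = some tok := by
  rw [PySem.Chars.endswith_iff]
  constructor
  · intro hsuf
    rcases List.eq_nil_or_concat T with hT0 | ⟨T', x, hTx⟩
    · subst hT0
      rw [PySem.Chars.join_nil] at hsuf
      exact absurd (List.suffix_nil.mp hsuf) (by simp)
    · rw [List.concat_eq_append] at hTx
      subst hTx
      have hxT : x ∈ T' ++ [x] := by simp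
      have hxfree : ('_' : Char) ∉ x := hT x hxT
      cases hT' : T' with
      | nil =>
        subst hT'
        rw [List.nil_append, PySem.Chars.join_singleton] at hsuf
        exact absurd (hsuf.subset (by simp)) hxfree
      | cons a T'' =>
        have hne : T' ≠ [] := by simp [hT']
        rw [pvJoin_concat T' x hne] at hsuf
        have hsufx : ('_' :: x) <:+ PySem.Chars.join ['_'] T' ++ '_' :: x :=
          List.suffix_append _ _
        have htx : tok = x := by
          rcases List.suffix_or_suffix_of_suffix hsuf hsufx with hc | hc
          · rcases List.suffix_cons_iff.mp hc with he | hc'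
            · simpa using he
            · exact absurd (hc'.subset (by simp)) hxfree
          · rcases List.suffix_cons_iff.mp hc with he | hc'
            · simpa using he.symm
            · exact absurd (hc'.subset (by simp)) htok
        subst htx
        refine ⟨by simp, List.getLast?_concat⟩
  · rintro ⟨hlen, hlast⟩
    obtain ⟨T', hTx⟩ := List.getLast?_eq_some_iff.mp hlast
    subst hTx
    have hne : T' ≠ [] := by
      intro h0; rw [h0] at hlen; simp at hlen
    rw [pvJoin_concat T' tok hne]
    exact List.suffix_append _ _

-- token-level model of one pass of A's inner for loop
def pvScan : List (List Char) → List (List Char) → Bool → List (List Char) × Bool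
  | [], T, b => (T, b)
  | suf :: rest, T, b =>
    if 2 ≤ T.length ∧ T.getLast? = some suf.tail then pvScan rest T.dropLast true
    else pvScan rest T b

lemma pvScan_wf (sufs T b) (hT : pvWF T) : pvWF (pvScan sufs T b).1 := by
  induction sufs generalizing T b with
  | nil => exact hT
  | cons suf rest ih =>
    simp only [pvScan]
    split_ifs
    · exact ih _ _ (fun x hx => hT x ((List.dropLast_sublist T).mem hx))
    · exact ih _ _ hT

lemma pvPass_eq (sufs : List (List Char))
    (hs : ∀ suf ∈ sufs, ∃ tok, suf = '_' :: tok ∧ ('_' : Char) ∉ tok)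
    (T : List (List Char)) (b : Bool) (hT : pvWF T) :
    sufs.foldl pvStepA (PySem.Chars.join ['_'] T, b)
      = (PySem.Chars.join ['_'] (pvScan sufs T b).1, (pvScan sufs T b).2) := by
  induction sufs generalizing T b with
  | nil => simp [pvScan]
  | cons suf rest ihs =>
    obtain ⟨tok, hsuf, htok⟩ := hs suf (by simp)
    have hrest : ∀ s ∈ rest, ∃ tok, s = '_' :: tok ∧ ('_' : Char) ∉ tok :=
      fun s hsm => hs s (by simp [hsm])
    simp only [List.foldl_cons, pvScan]
    by_cases hcond : 2 ≤ T.length ∧ T.getLast? = some suf.tail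
    · rw [if_pos hcond]
      have hstep : pvStepA (PySem.Chars.join ['_'] T, b) suf
          = (PySem.Chars.join ['_'] T.dropLast, true) := by
        unfold pvStepA
        have hend : PySem.Chars.endswith (PySem.Chars.join ['_'] T) suf = true := by
          rw [hsuf]
          rw [hsuf] at hcond
          exact (pvEndswith_join T tok hT htok).mpr (by simpa using hcond)
        rw [if_pos hend]
        obtain ⟨T', hTx⟩ := List.getLast?_eq_some_iff.mp hcond.2
        have hT'ne : T' ≠ [] := by
          intro h0; rw [hTx, h0] at hcond; simp at hcond
        rw [hTx, pvJoin_concat T' suf.tail hT'ne,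
          show (T' ++ [suf.tail]).dropLast = T' by simp]
        dsimp only
        have hsl : suf.tail.length + 1 = suf.length := by rw [hsuf]; simp
        simp only [PySem.Chars.slice_eq_listSlice]
        rw [PySem.List.slice_to_neg_natCast _ (k := suf.length) (by rw [hsuf]; simp)]
        have hlen : (PySem.Chars.join ['_'] T' ++ '_' :: suf.tail).length
            = (PySem.Chars.join ['_'] T').length + suf.length := by
          rw [List.length_append, List.length_cons, hsl]
        rw [hlen, Nat.add_sub_cancel]
        simp only [Prod.mk.injEq]
        exact ⟨List.take_left' rfl, trivial⟩
      rw [hstep]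
      exact ihs hrest T.dropLast true (fun x hx => hT x ((List.dropLast_sublist T).mem hx))
    · rw [if_neg hcond]
      have hstep : pvStepA (PySem.Chars.join ['_'] T, b) suf = (PySem.Chars.join ['_'] T, b) := by
        unfold pvStepA
        have hend : PySem.Chars.endswith (PySem.Chars.join ['_'] T) suf = false := by
          rw [hsuf]
          rw [hsuf] at hcond
          simpa using fun h => hcond ((pvEndswith_join T tok hT htok).mp h)
        rw [hend]
        simp
      rw [hstep]
      exact ihs hrest T b hT

lemma pvScan_flag_true (sufs T) : (pvScan sufs T true).2 = true := by
  induction sufs generalizing T with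
  | nil => rfl
  | cons suf rest ih =>
    simp only [pvScan]
    split_ifs <;> exact ih _

lemma pvScan_false (sufs T b) (h : (pvScan sufs T b).2 = false) :
    (pvScan sufs T b).1 = T ∧ ∀ suf ∈ sufs, ¬(2 ≤ T.length ∧ T.getLast? = some suf.tail) := by
  induction sufs generalizing T b with
  | nil => exact ⟨rfl, by simp⟩
  | cons suf rest ih =>
    simp only [pvScan] at h ⊢
    split_ifs at h ⊢ with hc
    · exact absurd (pvScan_flag_true rest T.dropLast) (by rw [h]; simp)
    · obtain ⟨h1, h2⟩ := ih T b h
      exact ⟨h1, by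
        intro s hsm
        rcases List.mem_cons.mp hsm with he | hm
        · subst he; exact hc
        · exact h2 s hm⟩

lemma pvScan_len (sufs T b) : (pvScan sufs T b).1.length ≤ T.length := by
  induction sufs generalizing T b with
  | nil => exact le_refl _
  | cons suf rest ih =>
    simp only [pvScan]
    split_ifs
    · calc (pvScan rest T.dropLast true).1.length ≤ T.dropLast.length := ih _ _
        _ ≤ T.length := by simp [List.length_dropLast]
    · exact ih _ _

lemma pvScan_lt (sufs T) (h : (pvScan sufs T false).2 = true) :
    (pvScan sufs T false).1.length < T.length := by
  induction sufs generalizing T with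
  | nil => simp [pvScan] at h
  | cons suf rest ih =>
    simp only [pvScan] at h ⊢
    split_ifs at h ⊢ with hc
    · calc (pvScan rest T.dropLast true).1.length ≤ T.dropLast.length := pvScan_len _ _ _
        _ < T.length := by simp [List.length_dropLast]; omega
    · exact ih _ h

-- proof-side model of repeatedly dropping a droppable last token (what B's counter walk performs)
def pvPopLoop (T : List (List Char)) : List (List Char) :=
  if _h : 1 < T.length ∧ T.getLast?.any (fun t => decide (t ∈ pvDroppable)) = true then
    pvPopLoop T.dropLast
  else T
termination_by T.length
decreasing_by simp [List.length_dropLast]; omega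

lemma pvPopLoop_pop (T : List (List Char))
    (h : 1 < T.length ∧ T.getLast?.any (fun t => decide (t ∈ pvDroppable)) = true) :
    pvPopLoop T = pvPopLoop T.dropLast := by
  rw [pvPopLoop]; rw [dif_pos h]

lemma pvPopLoop_stop (T : List (List Char))
    (h : ¬(1 < T.length ∧ T.getLast?.any (fun t => decide (t ∈ pvDroppable)) = true)) :
    pvPopLoop T = T := by
  rw [pvPopLoop]; rw [dif_neg h]

-- each pop performed by pvScan is a valid pvPopLoop step
lemma pvScan_popLoop (sufs : List (List Char))
    (hs : ∀ suf ∈ sufs, suf.tail ∈ pvDroppable) (T b) :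
    pvPopLoop (pvScan sufs T b).1 = pvPopLoop T := by
  induction sufs generalizing T b with
  | nil => rfl
  | cons suf rest ih =>
    have hrest : ∀ s ∈ rest, s.tail ∈ pvDroppable :=
      fun s hsm => hs s (by simp [hsm])
    simp only [pvScan]
    split_ifs with hc
    · rw [ih hrest T.dropLast true]
      refine (pvPopLoop_pop T ⟨by omega, ?_⟩).symm
      rw [hc.2]
      simpa [Option.any] using hs suf (by simp)
    · exact ih hrest T b

-- if no suffix condition fires, pvPopLoop is already stuck
lemma pvPopLoop_stuck (T : List (List Char))
    (h : ∀ suf ∈ pvSuffixes, ¬(2 ≤ T.length ∧ T.getLast? = some suf.tail)) :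
    pvPopLoop T = T := by
  by_cases hg : 1 < T.length ∧ T.getLast?.any (fun t => decide (t ∈ pvDroppable)) = true
  · exfalso
    rcases List.eq_nil_or_concat T with h0 | ⟨T', t, hTx⟩
    · rw [h0] at hg; simp at hg
    · rw [List.concat_eq_append] at hTx
      subst hTx
      rw [List.getLast?_concat] at hg
      have hmem : t ∈ pvDroppable := by
        have h2 := hg.2
        simpa [Option.any] using h2
      have hlen : 2 ≤ (T' ++ [t]).length := by
        have h1 := hg.1
        simp only [List.length_append, List.length_cons] at h1 ⊢
        omega
      unfold pvDroppable at hmem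
      simp only [List.mem_cons, List.not_mem_nil, or_false] at hmem
      rcases hmem with h1 | h1 | h1 | h1 | h1 | h1 <;> subst h1
      · exact h ['_','l','a','t','e','s','t'] (by simp [pvSuffixes])
          ⟨hlen, by rw [List.getLast?_concat]; rfl⟩
      · exact h ['_','l','a','s','t','e','s','t'] (by simp [pvSuffixes])
          ⟨hlen, by rw [List.getLast?_concat]; rfl⟩
      · exact h ['_','l','o','g','s'] (by simp [pvSuffixes])
          ⟨hlen, by rw [List.getLast?_concat]; rfl⟩
      · exact h ['_','l','o','g'] (by simp [pvSuffixes])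
          ⟨hlen, by rw [List.getLast?_concat]; rfl⟩
      · exact h ['_','c','o','l','l','e','c','t','o','r'] (by simp [pvSuffixes])
          ⟨hlen, by rw [List.getLast?_concat]; rfl⟩
      · exact h ['_','e','v','e','n','t','s'] (by simp [pvSuffixes])
          ⟨hlen, by rw [List.getLast?_concat]; rfl⟩
  · exact pvPopLoop_stop T hg

lemma pvLoopA_eq : ∀ (fuel : Nat) (T : List (List Char)), pvWF T → T.length ≤ fuel + 1 →
    pvLoopA fuel (PySem.Chars.join ['_'] T) = PySem.Chars.join ['_'] (pvPopLoop T) := by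
  have hs : ∀ suf ∈ pvSuffixes, ∃ tok, suf = '_' :: tok ∧ ('_' : Char) ∉ tok := by
    intro suf hsm
    simp only [pvSuffixes, List.mem_cons, List.not_mem_nil, or_false] at hsm
    rcases hsm with h | h | h | h | h | h <;> subst h <;> exact ⟨_, rfl, by decide⟩
  have hcont : ∀ suf ∈ pvSuffixes, suf.tail ∈ pvDroppable := by
    intro suf hsm
    simp only [pvSuffixes, List.mem_cons, List.not_mem_nil, or_false] at hsm
    rcases hsm with h | h | h | h | h | h <;> subst h <;> decide
  intro fuel
  induction fuel with
  | zero =>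
    intro T hT hlen
    simp only [pvLoopA]
    rw [pvPopLoop_stop T (by intro hg; omega)]
  | succ fuel ih =>
    intro T hT hlen
    simp only [pvLoopA]
    rw [pvPass_eq pvSuffixes hs T false hT]
    cases hflag : (pvScan pvSuffixes T false).2 with
    | false =>
      obtain ⟨h1, h2⟩ := pvScan_false _ _ _ hflag
      simp only [if_false, Bool.false_eq_true]
      rw [h1, pvPopLoop_stuck T h2]
    | true =>
      simp only [if_true]
      rw [ih (pvScan pvSuffixes T false).1 (pvScan_wf _ _ _ hT)
        (by have := pvScan_lt pvSuffixes T hflag; omega)]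
      rw [pvScan_popLoop pvSuffixes hcont T false]

-- B's counter walk only inspects indices below the counter
lemma pvKeep_le (T : List (List Char)) (k : Nat) : pvKeep T k ≤ k := by
  induction k with
  | zero => simp [pvKeep]
  | succ j ih =>
    simp only [pvKeep]
    split_ifs
    · omega
    · exact le_refl _

lemma pvKeep_dropLast (T : List (List Char)) (k : Nat) (h : k ≤ T.length - 1) :
    pvKeep T.dropLast k = pvKeep T k := by
  induction k with
  | zero => rfl
  | succ j ih =>
    have hj : T.dropLast.getD j [] = T.getD j [] := by
      have hlt : j < T.length - 1 := by omega
      simp only [List.getD, List.getElem?_dropLast]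
      rw [if_pos (by simpa [List.length_dropLast] using hlt)]
    simp only [pvKeep, hj]
    split_ifs
    · exact ih (by omega)
    · rfl

-- B's take-a-prefix result is exactly pvPopLoop
lemma pvTake_eq (T : List (List Char)) : T.take (pvKeep T T.length) = pvPopLoop T := by
  induction hn : T.length using Nat.strong_induction_on generalizing T with
  | _ n ihn =>
  subst hn
  by_cases hg : 1 < T.length ∧ T.getLast?.any (fun t => decide (t ∈ pvDroppable)) = true
  · obtain ⟨hlen, hlast⟩ := hg
    cases hL : T.getLast? with
    | none => rw [hL] at hlast; simp [Option.any] at hlast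
    | some t =>
      rw [hL] at hlast
      have hmem : t ∈ pvDroppable := by simpa [Option.any] using hlast
      obtain ⟨T', hTx⟩ := List.getLast?_eq_some_iff.mp hL
      have hlen1 : T.length = T'.length + 1 := by rw [hTx]; simp
      have hguardtok : T.getD T'.length [] = t := by
        rw [hTx]
        simp only [List.getD]
        rw [List.getElem?_append_right (le_refl _)]
        simp
      have hstep : pvKeep T T.length = pvKeep T T'.length := by
        rw [hlen1]
        simp only [pvKeep]
        rw [if_pos ⟨by omega, by rw [hguardtok]; exact hmem⟩]
      have hdl : T.dropLast = T' := by rw [hTx, List.dropLast_concat]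
      have hkd : pvKeep T T'.length = pvKeep T' T'.length := by
        rw [← pvKeep_dropLast T T'.length (by omega), hdl]
      have hle : pvKeep T' T'.length ≤ T'.length := pvKeep_le _ _
      have htk : T.take (pvKeep T' T'.length) = T'.take (pvKeep T' T'.length) := by
        rw [hTx, List.take_append_of_le_length hle]
      rw [hstep, hkd, htk]
      rw [ihn T'.length (by omega) T' rfl]
      rw [pvPopLoop_pop T ⟨hlen, by rw [hL]; simpa [Option.any] using hmem⟩, hdl]
  · rw [pvPopLoop_stop T hg]
    push_neg at hg
    cases hT0 : T.length with
    | zero =>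
      have : T = [] := List.length_eq_zero_iff.mp hT0
      subst this; rfl
    | succ m =>
      cases m with
      | zero =>
        simp only [pvKeep]
        rw [if_neg (by omega)]
        rw [← hT0, List.take_length]
      | succ m' =>
        have hlen : 1 < T.length := by omega
        have hlast := hg hlen
        have hm1 : m' + 1 < T.length := by omega
        have hidx : T[m' + 1]? = some (T[m' + 1]'hm1) := List.getElem?_eq_getElem hm1
        have hL : T.getLast? = some (T[m' + 1]'hm1) := by
          rw [List.getLast?_eq_getElem?, hT0]
          simpa using hidx
        simp only [pvKeep]
        rw [if_neg ?hng]
        · rw [← hT0, List.take_length]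
        case hng =>
          rintro ⟨-, hmem⟩
          rw [hL] at hlast
          simp only [Option.any] at hlast
          apply hlast
          simp only [List.getD, hidx, Option.getD] at hmem
          exact decide_eq_true hmem

-- ===== VERDICT (by name: the statement is the Claim_ definition above) =====
theorem normalize_parser_name_py_spec : Claim_equal_normalize_parser_name_py := by
  intro name _
  unfold Spec_normalize_parser_name_py normalize_parser_name_py normalize_parser_name_py_alt
  have hnorm : (PySem.Str.replace (PySem.Str.replace (PySem.Str.lower name) "-" "_") " " "_").toList
      = pvNorm name.toList := by
    simp [PySem.Str.toList_replace, PySem.Str.toList_lower, pvNorm]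
  simp only [hnorm]
  have hsplit := pvSplitOn_eq (pvNorm name.toList)
  have hjoin := pvJoin_splitU (pvNorm name.toList)
  rw [hsplit]
  rw [pvTake_eq (pvSplitU (pvNorm name.toList))]
  have hloop := pvLoopA_eq ((pvNorm name.toList).length + 1) (pvSplitU (pvNorm name.toList))
    (pvSplitU_free _) (by have := pvSplitU_len (pvNorm name.toList); omega)
  rw [hjoin] at hloop
  rw [hloop]
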